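-- pv_equiv track=rewrite | github.com/Dakshh1012/cns | 06_double_rail_fence_cipher.py | encrypt_double_rail_fence
-- ===== SOURCE A (Python) =====
-- def encrypt_double_rail_fence(text, key):
--     """Encrypt using double rail fence with key-based columnar transposition"""
--     # First: Apply rail fence with 2 rails
--     fence = [[], []]
--     rail = 0
--
--     for char in text:
--         fence[rail].append(char)
--         rail = 1 - rail
--
--     combined = "".join(fence[0]) + "".join(fence[1])
--
--     # Second: Apply columnar transposition with key
--     cols = len(key)
--     rows = (len(combined) + cols - 1) // cols
--
--     # Pad if necessary
--     while len(combined) < rows * cols: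
--         combined += 'X'
--
--     # Create grid
--     grid = [combined[i:i+cols] for i in range(0, len(combined), cols)]
--
--     # Sort columns by key
--     key_order = sorted(range(len(key)), key=lambda i: key[i])
--     result = ""
--
--     for order in key_order:
--         for row in grid:
--             if order < len(row):
--                 result += row[order]
--
--     return result
-- ===== SOURCE B (Python) =====
-- def encrypt_double_rail_fence(text, key):
--     """Encrypt via 2-rail fence + keyed columnar transposition: closed-form strided
--     slices instead of an explicit rail loop and a row grid."""
--     combined = text[0::2] + text[1::2]
--     cols = len(key)
--     rows = (len(combined) + cols - 1) // cols
--     combined += 'X' * (rows * cols - len(combined))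
--     key_order = sorted(range(cols), key=lambda i: key[i])
--     return ''.join(combined[o::cols] for o in key_order)
-- ===== Notes on version B (the rewrite author's own statement) =====
-- stated objective: simpler
-- what changed: Replaces the per-character rail loop, the 'X'-padding while loop, the explicit row grid and the guarded double loop over grid cells by closed-form strided slices: combined = text[0::2] + text[1::2], one-shot padding with 'X' * (rows*cols - len), and ''.join(combined[o::cols] for o in key_order).
import Mathlib
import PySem

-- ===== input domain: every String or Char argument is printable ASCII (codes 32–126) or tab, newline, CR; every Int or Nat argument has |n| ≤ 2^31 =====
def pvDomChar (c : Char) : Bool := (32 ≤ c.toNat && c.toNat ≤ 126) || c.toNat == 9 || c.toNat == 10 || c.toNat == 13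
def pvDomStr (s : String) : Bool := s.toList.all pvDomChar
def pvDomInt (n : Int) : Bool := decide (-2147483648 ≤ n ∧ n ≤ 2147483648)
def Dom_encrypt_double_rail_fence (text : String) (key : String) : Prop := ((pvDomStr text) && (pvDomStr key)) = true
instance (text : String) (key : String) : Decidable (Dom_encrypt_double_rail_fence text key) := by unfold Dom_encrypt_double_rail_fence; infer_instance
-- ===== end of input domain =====

-- B replaces A's rail loop, padding while-loop, row grid and guarded double loop by
-- closed-form strided slices (combined = text[0::2] + text[1::2]; result column slices);
-- objective: simpler.

-- ===== PORT A =====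

-- fence[rail].append(char); rail = 1 - rail
def railStep (st : List Char × List Char × Int) (ch : Char) : List Char × List Char × Int :=
  if st.2.2 = 0 then (st.1 ++ [ch], st.2.1, 1 - st.2.2) else (st.1, st.2.1 ++ [ch], 1 - st.2.2)

-- while len(combined) < target: combined += 'X'
def padLoop (target : Int) (l : List Char) : List Char :=
  if h : (l.length : Int) < target then padLoop target (l ++ ['X']) else l
termination_by (target - l.length).toNat
decreasing_by simp only [List.length_append, List.length_cons, List.length_nil]; omega

def encrypt_double_rail_fence (text : String) (key : String) : String :=
  let f := text.toList.foldl railStep ([], [], 0)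
  let combined := f.1 ++ f.2.1
  let cols : Int := (key.toList.length : Int)
  let rows : Int := PySem.Int.floordiv ((combined.length : Int) + cols - 1) cols
  let combined := padLoop (rows * cols) combined
  let grid := (PySem.List.pyRange 0 (combined.length : Int) cols).map
    (fun i => PySem.List.slice combined (some i) (some (i + cols)))
  let key_order := PySem.List.sorted (PySem.List.pyRange 0 cols 1)
    (fun i => (PySem.List.pyGet? key.toList i).getD ' ')
  let result := key_order.foldl (fun result o =>
    grid.foldl (fun result row =>
      if o < (row.length : Int) then result ++ (PySem.List.pyGet? row o).toList else result) result) []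
  String.ofList result

-- ===== PORT B =====
def encrypt_double_rail_fence_alt (text : String) (key : String) : String :=
  let t := text.toList
  let combined := (PySem.List.slice? t (some 0) none 2).getD [] ++
                  (PySem.List.slice? t (some 1) none 2).getD []
  let cols : Int := (key.toList.length : Int)
  let rows : Int := PySem.Int.floordiv ((combined.length : Int) + cols - 1) cols
  let combined := combined ++ List.replicate (rows * cols - (combined.length : Int)).toNat 'X'
  let key_order := PySem.List.sorted (PySem.List.pyRange 0 cols 1)
    (fun i => (PySem.List.pyGet? key.toList i).getD ' ')
  String.ofList (key_order.flatMap (fun o => (PySem.List.slice? combined (some o) none cols).getD []))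

-- ===== PRECONDITION & SPEC =====
-- Pre_ excludes only key = "": there Python A raises ZeroDivisionError (cols = 0).
def Pre_encrypt_double_rail_fence (text : String) (key : String) : Prop := key.toList ≠ []
instance (text : String) (key : String) : Decidable (Pre_encrypt_double_rail_fence text key) := by unfold Pre_encrypt_double_rail_fence; infer_instance

def pvWitness_encrypt_double_rail_fence : String × String := ("HELLO WORLD", "KEY")

def Spec_encrypt_double_rail_fence (text : String) (key : String) (out : String) : Prop := out = encrypt_double_rail_fence_alt text key
instance (text : String) (key : String) (out : String) : Decidable (Spec_encrypt_double_rail_fence text key out) := by unfold Spec_encrypt_double_rail_fence; infer_instance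

-- ===== CLAIM (what is proved, stated in full; the proofs are below) =====
def Claim_equal_encrypt_double_rail_fence : Prop := ∀ (text : String) (key : String), Dom_encrypt_double_rail_fence text key → Pre_encrypt_double_rail_fence text key → Spec_encrypt_double_rail_fence text key (encrypt_double_rail_fence text key)

-- ===== LEMMAS AND PROOFS =====

-- the column of l at residue o (elements at indices o, o+c, o+2c, …)
def colAt (c o : Nat) (l : List Char) : List Char :=
  if hc : c = 0 then [] else
    match h : l[o]? with
    | none => []
    | some x => x :: colAt c (o + c) l
termination_by l.length - o
decreasing_by
  have := (List.getElem?_eq_some_iff.mp h).1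
  omega

lemma colAt_none {c o : Nat} {l : List Char} (h : l[o]? = none) : colAt c o l = [] := by
  rw [colAt]
  split
  · rfl
  · split <;> simp_all

lemma colAt_zero (o : Nat) (l : List Char) : colAt 0 o l = [] := by
  rw [colAt]; simp

lemma colAt_nil (c o : Nat) : colAt c o ([] : List Char) = [] := colAt_none (by simp)

lemma colAt_of_le {c o : Nat} {l : List Char} (h : l.length ≤ o) : colAt c o l = [] :=
  colAt_none (List.getElem?_eq_none_iff.mpr h)

lemma colAt_some {c o : Nat} {l : List Char} {x : Char} (hc : c ≠ 0) (h : l[o]? = some x) :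
    colAt c o l = x :: colAt c (o + c) l := by
  rw [colAt]
  rw [dif_neg hc]
  split <;> simp_all

lemma colAt_shift (c : Nat) (a : Char) : ∀ (n o : Nat) (l : List Char), l.length - o ≤ n →
    colAt c (o + 1) (a :: l) = colAt c o l := by
  intro n
  induction n with
  | zero =>
    intro o l hn
    rw [colAt_of_le (l := l) (by omega), colAt_of_le (by simp; omega)]
  | succ n ih =>
    intro o l hn
    by_cases hc : c = 0
    · subst hc
      rw [colAt_zero, colAt_zero]
    cases h : l[o]? with
    | none =>
      rw [colAt_none h, colAt_none (by simpa using h)]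
    | some x =>
      have ho : o < l.length := (List.getElem?_eq_some_iff.mp h).1
      rw [colAt_some hc h, colAt_some hc (x := x) (by simpa using h)]
      have : o + 1 + c = (o + c) + 1 := by omega
      rw [this, ih (o + c) l (by omega)]

lemma colAt_drop (c : Nat) (hc : 0 < c) : ∀ (n o : Nat) (l : List Char), l.length - o ≤ n →
    colAt c (o + c) l = colAt c o (l.drop c) := by
  intro n
  induction n with
  | zero =>
    intro o l hn
    rw [colAt_of_le (by omega), colAt_of_le (by simp; omega)]
  | succ n ih =>
    intro o l hn
    have hget : (l.drop c)[o]? = l[o + c]? := by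
      rw [List.getElem?_drop]; congr 1; omega
    cases h : l[o + c]? with
    | none =>
      rw [colAt_none h, colAt_none (hget.trans h)]
    | some x =>
      have ho : o + c < l.length := (List.getElem?_eq_some_iff.mp h).1
      rw [colAt_some (by omega) h, colAt_some (by omega) (hget.trans h)]
      have : o + c + c = (o + c) + c := rfl
      rw [this, ih (o + c) l (by omega)]

lemma colAt_chunk {c : Nat} (hc : 0 < c) (o : Nat) (l : List Char) :
    colAt c o l = (l[o]?).toList ++ colAt c o (l.drop c) := by
  cases h : l[o]? with
  | none =>
    have hlen : l.length ≤ o := List.getElem?_eq_none_iff.mp h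
    rw [colAt_none h, colAt_of_le (by simp; omega)]
    rfl
  | some x =>
    rw [colAt_some (by omega) h, ← colAt_drop c hc (l.length - o) o l le_rfl]
    rfl

lemma ceil_succ (m c : Nat) (hc : 0 < c) (hm : 0 < m) :
    (m + c - 1) / c = ((m - c) + c - 1) / c + 1 := by
  rw [show m + c - 1 = (m - 1) + c from by omega, Nat.add_div_right _ hc]
  congr 1
  by_cases h : m ≤ c
  · rw [Nat.sub_eq_zero_of_le h]
    rw [Nat.div_eq_of_lt (by omega), Nat.div_eq_of_lt (by omega)]
  · congr 1
    omega

lemma filterMap_range_ceil (c : Nat) (hc : 0 < c) (l : List Char) : ∀ (n o : Nat), l.length - o ≤ n →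
    (List.range ((l.length - o + c - 1) / c)).filterMap (fun k => l[o + c * k]?) = colAt c o l := by
  intro n
  induction n with
  | zero =>
    intro o hn
    have h1 : l.length - o = 0 := by omega
    rw [h1, Nat.zero_add, Nat.div_eq_of_lt (by omega)]
    rw [colAt_of_le (by omega)]
    rfl
  | succ n ih =>
    intro o hn
    by_cases hlen : l.length ≤ o
    · rw [show l.length - o = 0 from by omega, Nat.zero_add, Nat.div_eq_of_lt (by omega)]
      rw [colAt_of_le hlen]
      rfl
    · have hm : 0 < l.length - o := by omega
      rw [ceil_succ _ c hc hm, List.range_succ_eq_map, List.filterMap_cons, List.filterMap_map]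
      rw [show o + c * 0 = o from by omega]
      rw [List.getElem?_eq_getElem (show o < l.length from by omega)]
      have hfun : ((fun k => l[o + c * k]?) ∘ Nat.succ) = (fun k => l[(o + c) + c * k]?) := by
        funext k
        simp only [Function.comp, Nat.succ_eq_add_one]
        have : o + c * (k + 1) = o + c + c * k := by ring
        rw [this]
      rw [hfun]
      rw [show l.length - o - c + c - 1 = l.length - (o + c) + c - 1 from by omega]
      rw [ih (o + c) (by omega)]
      rw [colAt_some (by omega) (List.getElem?_eq_getElem (show o < l.length from by omega))]

lemma slice?_eq_colAt (l : List Char) (o : Int) (c : Nat) (hc : 0 < c) (ho : 0 ≤ o) :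
    PySem.List.slice? l (some o) none (c : Int) = some (colAt c o.toNat l) := by
  have h1 : ¬((c:Int) < 0) := by omega
  have h2 : (0:Int) < (c:Int) := by exact_mod_cast hc
  rw [PySem.List.slice?]
  rw [if_neg (by omega : ¬ (c:Int) = 0)]
  simp only [PySem.List.sliceIndices]
  rw [if_neg (by omega : ¬ (c:Int) < 0), if_neg (by omega : ¬ o < 0)]
  simp only [h1, if_false, if_pos h2]
  by_cases hol : o < (l.length : Int)
  · have hmin : min o (l.length:Int) = o := by omega
    rw [hmin, if_pos hol]
    have hcount : (((l.length:Int) - o + c - 1) / c).toNat = (l.length - o.toNat + c - 1) / c := by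
      have : ((l.length:Int) - o + c - 1) = ((l.length - o.toNat + c - 1 : Nat) : Int) := by omega
      rw [this, ← Int.natCast_div, Int.toNat_natCast]
    rw [hcount, ← filterMap_range_ceil c hc l (l.length - o.toNat) o.toNat le_rfl]
    congr 1
    apply List.filterMap_congr
    intro k _
    congr 1
    omega
  · have hmin : min o (l.length:Int) = (l.length:Int) := by omega
    rw [hmin, if_neg (by omega)]
    rw [colAt_of_le (by omega)]
    rfl

lemma grid_cons (c : Nat) (hc : 0 < c) (l : List Char) (hl : l ≠ []) :
    (PySem.List.pyRange 0 (l.length : Int) (c : Int)).map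
        (fun i => PySem.List.slice l (some i) (some (i + (c : Int))))
      = l.take c :: (PySem.List.pyRange 0 ((l.drop c).length : Int) (c : Int)).map
        (fun i => PySem.List.slice (l.drop c) (some i) (some (i + (c : Int)))) := by
  have h2 : (0:Int) < (c:Int) := by exact_mod_cast hc
  have hlen : 0 < l.length := List.length_pos_of_ne_nil hl
  rw [PySem.List.pyRange_of_pos, PySem.List.pyRange_of_pos] <;> try exact h2
  rw [if_pos (by exact_mod_cast hlen)]
  have hcount : (((l.length:Int) - 0 + c - 1) / c).toNat = (l.length + c - 1) / c := by
    have : ((l.length:Int) - 0 + c - 1) = ((l.length + c - 1 : Nat) : Int) := by omega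
    rw [this, ← Int.natCast_div, Int.toNat_natCast]
  rw [hcount]
  have hdlen : (l.drop c).length = l.length - c := List.length_drop
  have hcount2 : (if (0:Int) < ((l.drop c).length : Int) then ((((l.drop c).length:Int) - 0 + c - 1) / c).toNat else 0)
      = (l.length - c + c - 1) / c := by
    by_cases hd : 0 < (l.drop c).length
    · rw [if_pos (by exact_mod_cast hd)]
      have : (((l.drop c).length:Int) - 0 + c - 1) = ((l.length - c + c - 1 : Nat) : Int) := by omega
      rw [this, ← Int.natCast_div, Int.toNat_natCast]
    · rw [if_neg (by omega)]
      have : l.length - c = 0 := by omega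
      rw [this, Nat.zero_add, Nat.div_eq_of_lt (by omega)]
  rw [hcount2]
  have hcs : (l.length + c - 1) / c = ((l.length - c) + c - 1)/c + 1 := ceil_succ l.length c hc hlen
  rw [hcs, List.range_succ_eq_map]
  simp only [List.map_cons, List.map_map]
  congr 1
  · show PySem.List.slice l (some (0 + (c:Int) * (0:Nat))) (some (0 + (c:Int) * (0:Nat) + c)) = l.take c
    rw [show (0 + (c:Int) * ((0:Nat):Int)) = 0 by simp]
    rw [PySem.List.slice_zero_start, PySem.List.slice_to l (by omega)]
    congr 1
    omega
  · apply List.map_congr_left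
    intro k _
    show PySem.List.slice l (some (0 + (c:Int) * (k.succ:Int))) (some (0 + (c:Int) * (k.succ:Int) + c))
        = PySem.List.slice (l.drop c) (some (0 + (c:Int) * (k:Int))) (some (0 + (c:Int) * (k:Int) + c))
    have e1 : (0 + (c:Int) * (k.succ:Int)) = ((c + c * k : Nat) : Int) := by push_cast; ring
    have e2 : (0 + (c:Int) * (k.succ:Int) + c) = ((c + c * k : Nat) : Int) + ((c:Nat):Int) := by push_cast; ring
    have e3 : (0 + (c:Int) * (k:Int)) = ((c * k : Nat) : Int) := by push_cast; ring
    have e4 : (0 + (c:Int) * (k:Int) + c) = ((c * k : Nat) : Int) + ((c:Nat):Int) := by push_cast; ring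
    rw [e2, e1, e4, e3, PySem.List.slice_natCast_add, PySem.List.slice_natCast_add]
    rw [List.drop_drop]


lemma chunk_fold (c : Nat) (hc : 0 < c) (o : Int) (ho : 0 ≤ o) (hoc : o < (c : Int)) :
    ∀ (n : Nat) (l : List Char), l.length ≤ n → ∀ (acc : List Char),
    ((PySem.List.pyRange 0 (l.length : Int) (c : Int)).map
        (fun i => PySem.List.slice l (some i) (some (i + (c : Int))))).foldl
      (fun result row => if o < (row.length : Int) then result ++ (PySem.List.pyGet? row o).toList else result) acc
    = acc ++ colAt c o.toNat l := by
  intro n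
  induction n with
  | zero =>
    intro l hn acc
    have : l = [] := List.eq_nil_of_length_eq_zero (by omega)
    subst this
    rw [PySem.List.pyRange_of_pos _ _ (by exact_mod_cast hc)]
    simp [colAt_nil]
  | succ n ih =>
    intro l hn acc
    by_cases hl : l = []
    · subst hl
      rw [PySem.List.pyRange_of_pos _ _ (by exact_mod_cast hc)]
      simp [colAt_nil]
    · rw [grid_cons c hc l hl, List.foldl_cons]
      rw [ih (l.drop c) (by have := List.length_pos_of_ne_nil hl; simp; omega)]
      rw [colAt_chunk hc o.toNat l]
      have hox : o = ((o.toNat : Nat) : Int) := by omega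
      rw [hox, PySem.List.pyGet?_natCast]
      rw [List.getElem?_take]
      rw [if_pos (show o.toNat < c from by omega)]
      by_cases hol : o.toNat < l.length
      · rw [if_pos (by simp; omega)]
        cases h : l[o.toNat]? with
        | none => exact absurd (List.getElem?_eq_none_iff.mp h) (by omega)
        | some x =>
          rw [show ((o.toNat : Int)).toNat = o.toNat from by omega, h, List.append_assoc]
      · rw [if_neg (by simp; omega)]
        rw [List.getElem?_eq_none_iff.mpr (by omega)]
        simp

lemma rail_aux (l : List Char) : ∀ (f0 f1 : List Char),
    ((l.foldl railStep (f0, f1, 0)).1 = f0 ++ colAt 2 0 l ∧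
     (l.foldl railStep (f0, f1, 0)).2.1 = f1 ++ colAt 2 1 l) ∧
    ((l.foldl railStep (f0, f1, 1)).1 = f0 ++ colAt 2 1 l ∧
     (l.foldl railStep (f0, f1, 1)).2.1 = f1 ++ colAt 2 0 l) := by
  induction l with
  | nil => simp [colAt_nil]
  | cons a l ih =>
    intro f0 f1
    have h0 : colAt 2 0 (a :: l) = a :: colAt 2 1 l := by
      rw [colAt_some (by omega) (l := a :: l) (o := 0) (x := a) (by simp)]
      have : (0 + 2 : Nat) = 1 + 1 := by omega
      rw [this, colAt_shift 2 a (l.length - 1) 1 l (by omega)]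
    have h1 : colAt 2 1 (a :: l) = colAt 2 0 l := by
      have : (1 : Nat) = 0 + 1 := rfl
      rw [this, colAt_shift 2 a l.length 0 l (by omega)]
    constructor
    · have hstep : railStep (f0, f1, 0) a = (f0 ++ [a], f1, 1) := by
        simp [railStep]
      rw [List.foldl_cons, hstep]
      refine ⟨?_, ?_⟩
      · rw [((ih (f0 ++ [a]) f1).2).1, h0, List.append_assoc]
        rfl
      · rw [((ih (f0 ++ [a]) f1).2).2, h1]
    · have hstep : railStep (f0, f1, 1) a = (f0, f1 ++ [a], 0) := by
        simp [railStep]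
      rw [List.foldl_cons, hstep]
      refine ⟨?_, ?_⟩
      · rw [((ih f0 (f1 ++ [a])).1).1, h1]
      · rw [((ih f0 (f1 ++ [a])).1).2, h0, List.append_assoc]
        rfl

lemma padLoop_eq (t : Int) : ∀ (n : Nat) (l : List Char), (t - l.length).toNat ≤ n →
    padLoop t l = l ++ List.replicate (t - (l.length : Int)).toNat 'X' := by
  intro n
  induction n with
  | zero =>
    intro l hn
    rw [padLoop, dif_neg (by omega), show (t - (l.length : Int)).toNat = 0 from by omega]
    simp
  | succ n ih =>
    intro l hn
    by_cases h : (l.length : Int) < t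
    · rw [padLoop, dif_pos h, ih (l ++ ['X']) (by simp; omega)]
      rw [show (t - (l.length : Int)).toNat = (t - (((l ++ ['X']).length : Nat) : Int)).toNat + 1 from by simp; omega]
      simp [List.replicate_succ]
    · rw [padLoop, dif_neg h, show (t - (l.length : Int)).toNat = 0 from by omega]
      simp

-- ===== VERDICT (by name: the statement is the Claim_ definition above) =====
theorem encrypt_double_rail_fence_spec : Claim_equal_encrypt_double_rail_fence := by
  intro text key _ hpre
  unfold Spec_encrypt_double_rail_fence
  simp only [encrypt_double_rail_fence, encrypt_double_rail_fence_alt]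
  have hc : 0 < key.toList.length := List.length_pos_of_ne_nil hpre
  have h20 : ((2:Nat):Int) = (2:Int) := by norm_num
  have hA0 : (List.foldl railStep ([], [], 0) text.toList).1 = colAt 2 0 text.toList := by
    simpa using ((rail_aux text.toList [] []).1).1
  have hA1 : (List.foldl railStep ([], [], 0) text.toList).2.1 = colAt 2 1 text.toList := by
    simpa using ((rail_aux text.toList [] []).1).2
  have hB0 : (PySem.List.slice? text.toList (some 0) none 2).getD [] = colAt 2 0 text.toList := by
    rw [← h20, slice?_eq_colAt text.toList 0 2 (by norm_num) (by norm_num)]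
    rfl
  have hB1 : (PySem.List.slice? text.toList (some 1) none 2).getD [] = colAt 2 1 text.toList := by
    rw [← h20, slice?_eq_colAt text.toList 1 2 (by norm_num) (by norm_num)]
    rfl
  rw [hA0, hA1, hB0, hB1]
  set C : List Char := colAt 2 0 text.toList ++ colAt 2 1 text.toList with hC
  set tgt : Int := PySem.Int.floordiv ((C.length : Int) + (key.toList.length : Int) - 1) (key.toList.length : Int) * (key.toList.length : Int) with htgt
  rw [padLoop_eq tgt (tgt - (C.length : Int)).toNat C le_rfl]
  set P : List Char := C ++ List.replicate (tgt - (C.length : Int)).toNat 'X' with hP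
  congr 1
  rw [PySem.List.foldl_congr_mem _ _
        (fun acc (o : Int) => acc ++ colAt key.toList.length o.toNat P) []
        (fun acc o hmem => by
          have hb := (PySem.List.mem_pyRange_one).mp ((PySem.List.mem_sorted _ _ _ o).mp hmem)
          exact chunk_fold key.toList.length hc o hb.1 hb.2 P.length P le_rfl acc)]
  rw [PySem.List.foldl_append_eq_flatMap]
  rw [List.nil_append, List.flatMap_def, List.flatMap_def]
  congr 1
  apply List.map_congr_left
  intro o hmem
  have hb := (PySem.List.mem_pyRange_one).mp ((PySem.List.mem_sorted _ _ _ o).mp hmem)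
  rw [slice?_eq_colAt P o key.toList.length hc hb.1]
  rfl
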